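-- pv_equiv track=rewrite | github.com/limogin/confluencedoc2md | confluence2md.py | improve_table_formatting
-- ===== SOURCE A (Python) =====
-- def is_table_row(line):
--     """
--     Detecta si una línea es parte de una tabla.
--     """
--     if not line.strip():
--         return False
--
--     # Verificar si contiene barras verticales y tiene contenido en las celdas
--     if '|' not in line:
--         return False
--
--     cells = line.split('|')
--     # Debe tener al menos 3 partes (inicio vacío, contenido, fin vacío)
--     if len(cells) < 3:
--         return False
--
--     # Verificar que hay contenido en las celdas del medio
--     content_cells = [cell.strip() for cell in cells[1:-1]]
--     return any(cell for cell in content_cells)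
--
-- def improve_table_formatting(content):
--     """
--     Mejora el formato de las tablas en markdown.
--     """
--     if not content:
--         return content
--
--     lines = content.split('\n')
--     improved_lines = []
--     in_table = False
--     table_lines = []
--
--     for line in lines:
--         if is_table_row(line):
--             if not in_table:
--                 in_table = True
--                 # Agregar línea vacía antes de la tabla
--                 if improved_lines and improved_lines[-1] != '':
--                     improved_lines.append('')
--             table_lines.append(line)
--         elif in_table:
--             # Procesar tabla completa
--             if table_lines:
--                 improved_table = format_table(table_lines)
--                 improved_lines.extend(improved_table)
--                 improved_lines.append('')
--             in_table = False
--             table_lines = []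
--             improved_lines.append(line)
--         else:
--             improved_lines.append(line)
--
--     # Procesar tabla final si existe
--     if in_table and table_lines:
--         improved_table = format_table(table_lines)
--         improved_lines.extend(improved_table)
--
--     return '\n'.join(improved_lines)
--
-- def format_table(table_lines):
--     """
--     Formatea una tabla para que sea válida en markdown.
--     """
--     if not table_lines:
--         return []
--
--     # Encontrar el número máximo de columnas
--     max_columns = 0
--     for line in table_lines:
--         columns = len(line.split('|')) - 2  # Restar las barras del inicio y fin
--         max_columns = max(max_columns, columns)
--
--     if max_columns == 0:
--         return table_lines
--
--     # Procesar cada línea de la tabla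
--     formatted_lines = []
--     header_separator_added = False
--
--     for line in table_lines:
--         cells = line.split('|')
--         # Limpiar celdas vacías del inicio y fin
--         cells = [cell.strip() for cell in cells[1:-1]]
--
--         # Rellenar con celdas vacías si es necesario
--         while len(cells) < max_columns:
--             cells.append('')
--
--         # Crear línea formateada
--         formatted_line = '| ' + ' | '.join(cells) + ' |'
--         formatted_lines.append(formatted_line)
--
--         # Agregar separador de encabezado después de la primera línea
--         if not header_separator_added:
--             separator = '|' + '|'.join(['---'] * max_columns) + '|'
--             formatted_lines.append(separator)
--             header_separator_added = True
--
--     return formatted_lines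
-- ===== SOURCE B (Python) =====
-- def is_table_row(line):
--     """
--     Detecta si una línea es parte de una tabla.
--     """
--     if not line.strip():
--         return False
--     if '|' not in line:
--         return False
--     cells = line.split('|')
--     if len(cells) < 3:
--         return False
--     content_cells = [cell.strip() for cell in cells[1:-1]]
--     return any(cell for cell in content_cells)
--
-- def format_table(table_lines):
--     """
--     Formatea una tabla para que sea válida en markdown.
--     """
--     if not table_lines:
--         return []
--     max_columns = 0
--     for line in table_lines:
--         columns = len(line.split('|')) - 2
--         max_columns = max(max_columns, columns)
--     if max_columns == 0:
--         return table_lines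
--     formatted_lines = []
--     header_separator_added = False
--     for line in table_lines:
--         cells = line.split('|')
--         cells = [cell.strip() for cell in cells[1:-1]]
--         while len(cells) < max_columns:
--             cells.append('')
--         formatted_line = '| ' + ' | '.join(cells) + ' |'
--         formatted_lines.append(formatted_line)
--         if not header_separator_added:
--             separator = '|' + '|'.join(['---'] * max_columns) + '|'
--             formatted_lines.append(separator)
--             header_separator_added = True
--     return formatted_lines
--
-- def improve_table_formatting(content):
--     """
--     Mejora el formato de las tablas en markdown (run-partitioning pass).
--     """
--     if not content:
--         return content
--     lines = content.split('\n')
--     # Partition the lines into maximal runs of equal is_table_row value.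
--     runs = []
--     i, n = 0, len(lines)
--     while i < n:
--         k = is_table_row(lines[i])
--         j = i
--         while j < n and is_table_row(lines[j]) == k:
--             j += 1
--         runs.append((k, lines[i:j]))
--         i = j
--     out = []
--     for idx, (k, run) in enumerate(runs):
--         if k:
--             if out and out[-1] != '':
--                 out.append('')
--             out.extend(format_table(run))
--             if idx != len(runs) - 1:
--                 out.append('')
--         else:
--             out.extend(run)
--     return '\n'.join(out)
-- ===== Notes on version B (the rewrite author's own statement) =====
-- stated objective: alternative
-- what changed: Replaces the per-line in_table/table_lines accumulator state machine with a run-partitioning pass: the lines are first grouped into maximal runs of equal is_table_row value, then each run is emitted as a whole (table runs via format_table with the blank-line edges decided per run), with no per-line flag state.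
import Mathlib
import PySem

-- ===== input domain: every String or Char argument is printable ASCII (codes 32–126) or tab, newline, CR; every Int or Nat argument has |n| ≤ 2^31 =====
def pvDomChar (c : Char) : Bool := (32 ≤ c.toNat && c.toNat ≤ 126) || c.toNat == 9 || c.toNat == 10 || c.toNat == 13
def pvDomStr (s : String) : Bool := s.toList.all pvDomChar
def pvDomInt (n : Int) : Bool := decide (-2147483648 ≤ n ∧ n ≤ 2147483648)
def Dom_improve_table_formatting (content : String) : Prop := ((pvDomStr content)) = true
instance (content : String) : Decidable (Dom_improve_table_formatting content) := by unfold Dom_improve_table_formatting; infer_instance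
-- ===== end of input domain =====

-- B replaces A's per-line in_table/table_lines state machine by a run-partitioning pass
-- (group the lines into maximal runs of equal is_table_row value, emit run by run): an
-- alternative decomposition of the same cost; return values proved equal on all inputs.


-- ===== PORT A =====

-- str.split(sep) for a nonempty literal separator (exact: PySem.Chars.splitOn)
def pySplit (s sep : String) : List String := (PySem.Chars.splitOn s.toList sep.toList).map String.ofList

-- shared module helper is_table_row (identical in Source A and Source B)
def is_table_row (line : String) : Bool :=
  if PySem.Str.strip line = "" then false
  else if !(PySem.Str.isIn "|" line) then false
  else
    let cells := pySplit line "|"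
    if cells.length < 3 then false
    else
      let content_cells := (PySem.List.slice cells (some 1) (some (-1))).map PySem.Str.strip
      content_cells.any (fun c => c != "")

-- the 'while len(cells) < max_columns: cells.append('')' loop of format_table
def padCells (cells : List String) (n : Int) : List String :=
  if (cells.length : Int) < n then padCells (cells ++ [""]) n else cells
termination_by (n - cells.length).toNat
decreasing_by simp only [List.length_append, List.length_cons, List.length_nil]; omega

-- shared module helper format_table (identical in Source A and Source B)
def format_table (table_lines : List String) : List String :=
  if table_lines = [] then []
  else
    let max_columns : Int :=
      table_lines.foldl (fun m line => max m ((pySplit line "|").length - 2 : Int)) 0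
    if max_columns = 0 then table_lines
    else
      let st := table_lines.foldl (fun (st : List String × Bool) line =>
        let cells := (PySem.List.slice (pySplit line "|") (some 1) (some (-1))).map PySem.Str.strip
        let cells := padCells cells max_columns
        let formatted_line := "| " ++ PySem.Str.join " | " cells ++ " |"
        let fl := st.1 ++ [formatted_line]
        if !st.2 then
          (fl ++ ["|" ++ PySem.Str.join "|" (List.replicate max_columns.toNat "---") ++ "|"], true)
        else (fl, st.2)) ([], false)
      st.1

-- the body of A's for-loop: state = (improved_lines, in_table, table_lines)
def stepA (st : List String × Bool × List String) (line : String) : List String × Bool × List String :=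
  if is_table_row line then
    let st1 :=
      if !st.2.1 then
        ((if st.1 ≠ [] ∧ st.1.getLast? ≠ some "" then st.1 ++ [""] else st.1), true, st.2.2)
      else st
    (st1.1, st1.2.1, st1.2.2 ++ [line])
  else if st.2.1 then
    ((if st.2.2 ≠ [] then st.1 ++ format_table st.2.2 ++ [""] else st.1) ++ [line], false, [])
  else
    (st.1 ++ [line], st.2.1, st.2.2)

def improve_table_formatting (content : String) : String :=
  if content = "" then content
  else
    let lines := pySplit content "\n"
    let st := lines.foldl stepA ([], false, [])
    let final := if st.2.1 ∧ st.2.2 ≠ [] then st.1 ++ format_table st.2.2 else st.1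
    PySem.Str.join "\n" final

-- ===== PORT B =====

-- Source B's partitioning while-loop: maximal runs of equal is_table_row value
def runsOf : List String → List (Bool × List String)
  | [] => []
  | l :: ls =>
    (is_table_row l, (l :: ls).takeWhile (fun x => is_table_row x == is_table_row l)) ::
      runsOf ((l :: ls).dropWhile (fun x => is_table_row x == is_table_row l))
termination_by lines => lines.length
decreasing_by
  simp only [List.dropWhile_cons, beq_self_eq_true, if_true, List.length_cons]
  exact Nat.lt_succ_of_le (List.length_dropWhile_le _ _)

-- Source B's emit loop over the runs ('idx != len(runs) - 1' ↔ the remaining run list is nonempty)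
def goB (out : List String) : List (Bool × List String) → List String
  | [] => out
  | (k, run) :: rest =>
    if k then
      let out1 := if out ≠ [] ∧ out.getLast? ≠ some "" then out ++ [""] else out
      let out2 := out1 ++ format_table run
      let out3 := if rest ≠ [] then out2 ++ [""] else out2
      goB out3 rest
    else
      goB (out ++ run) rest

def improve_table_formatting_alt (content : String) : String :=
  if content = "" then content
  else
    let lines := pySplit content "\n"
    PySem.Str.join "\n" (goB [] (runsOf lines))

-- ===== PRECONDITION & SPEC =====
def Spec_improve_table_formatting (content : String) (out : String) : Prop := out = improve_table_formatting_alt content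
instance (content : String) (out : String) : Decidable (Spec_improve_table_formatting content out) := by unfold Spec_improve_table_formatting; infer_instance

-- ===== CLAIM (what is proved, stated in full; the proofs are below) =====
def Claim_equal_improve_table_formatting : Prop := ∀ (content : String), Dom_improve_table_formatting content → Spec_improve_table_formatting content (improve_table_formatting content)

-- ===== LEMMAS AND PROOFS =====

-- the final flush after A's loop, as a function of the loop state
def finishA (st : List String × Bool × List String) : List String :=
  if st.2.1 ∧ st.2.2 ≠ [] then st.1 ++ format_table st.2.2 else st.1

theorem stepA_false {line : String} (h : is_table_row line = false) (acc tbl : List String) :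
    stepA (acc, false, tbl) line = (acc ++ [line], false, tbl) := by
  simp [stepA, h]

theorem stepA_true_start {line : String} (h : is_table_row line = true) (acc tbl : List String) :
    stepA (acc, false, tbl) line =
      ((if acc ≠ [] ∧ acc.getLast? ≠ some "" then acc ++ [""] else acc), true, tbl ++ [line]) := by
  simp [stepA, h]

theorem stepA_true_cont {line : String} (h : is_table_row line = true) (acc tbl : List String) :
    stepA (acc, true, tbl) line = (acc, true, tbl ++ [line]) := by
  simp [stepA, h]

theorem stepA_false_end {line : String} (h : is_table_row line = false) (acc tbl : List String) :
    stepA (acc, true, tbl) line =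
      ((if tbl ≠ [] then acc ++ format_table tbl ++ [""] else acc) ++ [line], false, []) := by
  simp [stepA, h]

theorem foldl_false_run (run : List String) (h : ∀ x ∈ run, is_table_row x = false) :
    ∀ (rest acc tbl : List String),
      (run ++ rest).foldl stepA (acc, false, tbl) = rest.foldl stepA (acc ++ run, false, tbl) := by
  induction run with
  | nil => intro rest acc tbl; simp
  | cons l t ih =>
    intro rest acc tbl
    have hl : is_table_row l = false := h l (by simp)
    simp only [List.cons_append, List.foldl_cons, stepA_false hl]
    rw [ih (fun x hx => h x (by simp [hx]))]
    simp

theorem foldl_true_run (run : List String) (h : ∀ x ∈ run, is_table_row x = true) :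
    ∀ (rest acc tbl : List String),
      (run ++ rest).foldl stepA (acc, true, tbl) = rest.foldl stepA (acc, true, tbl ++ run) := by
  induction run with
  | nil => intro rest acc tbl; simp
  | cons l t ih =>
    intro rest acc tbl
    have hl : is_table_row l = true := h l (by simp)
    simp only [List.cons_append, List.foldl_cons, stepA_true_cont hl]
    rw [ih (fun x hx => h x (by simp [hx]))]
    simp

theorem mainA (n : Nat) : ∀ (lines : List String), lines.length = n →
    ∀ (acc : List String),
      finishA (lines.foldl stepA (acc, false, [])) = goB acc (runsOf lines) := by
  induction n using Nat.strong_induction_on with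
  | _ n IH =>
    intro lines hlen acc
    match lines with
    | [] => simp [runsOf, goB, finishA]
    | l :: ls =>
      simp only [List.length_cons] at hlen
      rw [runsOf]
      have hpl : (fun x => is_table_row x == is_table_row l) l = true := by simp
      rw [List.takeWhile_cons_of_pos (p := fun x => is_table_row x == is_table_row l) hpl,
          List.dropWhile_cons_of_pos (p := fun x => is_table_row x == is_table_row l) hpl]
      set p := fun x => is_table_row x == is_table_row l with hp
      have hrun : ∀ x ∈ ls.takeWhile p, is_table_row x = is_table_row l := by
        intro x hx
        have := List.mem_takeWhile_imp hx
        simpa [hp] using this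
      have hsplit : ls.takeWhile p ++ ls.dropWhile p = ls := List.takeWhile_append_dropWhile
      have hlen2 : (ls.takeWhile p).length + (ls.dropWhile p).length = ls.length := by
        rw [← List.length_append, hsplit]
      cases hk : is_table_row l with
      | false =>
        -- a non-table run: both sides just append it
        have hA : (l :: ls).foldl stepA (acc, false, []) =
            (ls.dropWhile p).foldl stepA (acc ++ l :: ls.takeWhile p, false, []) := by
          conv_lhs => rw [← hsplit]
          rw [List.foldl_cons, stepA_false hk,
              foldl_false_run _ (fun x hx => by rw [hrun x hx, hk])]
          simp
        rw [hA, goB]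
        exact IH (ls.dropWhile p).length (by omega) _ rfl _
      | true =>
        -- a table run
        have hA1 : (l :: ls).foldl stepA (acc, false, []) =
            (ls.dropWhile p).foldl stepA
              ((if acc ≠ [] ∧ acc.getLast? ≠ some "" then acc ++ [""] else acc), true,
               l :: ls.takeWhile p) := by
          conv_lhs => rw [← hsplit]
          rw [List.foldl_cons, stepA_true_start hk,
              foldl_true_run _ (fun x hx => by rw [hrun x hx, hk])]
          simp
        rw [hA1, goB]
        set acc1 := if acc ≠ [] ∧ acc.getLast? ≠ some "" then acc ++ [""] else acc with hacc1
        cases hrest : ls.dropWhile p with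
        | nil =>
          simp only [List.foldl_nil, runsOf, goB, finishA]
          simp
        | cons r rs =>
          have hr : is_table_row r = false := by
            have hne : ls.dropWhile p ≠ [] := by rw [hrest]; simp
            have h2 := List.head_dropWhile_not p hne
            have h4 : (ls.dropWhile p).head? = some r := by rw [hrest]; rfl
            rw [List.head?_eq_some_head hne] at h4
            rw [Option.some.inj h4] at h2
            simpa [hp, hk] using h2
          rw [List.foldl_cons, stepA_false_end hr]
          -- unfold runsOf on the following non-table run
          rw [runsOf]
          have hqr : (fun x => is_table_row x == is_table_row r) r = true := by simp
          rw [List.takeWhile_cons_of_pos (p := fun x => is_table_row x == is_table_row r) hqr,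
              List.dropWhile_cons_of_pos (p := fun x => is_table_row x == is_table_row r) hqr]
          set q := fun x => is_table_row x == is_table_row r with hq
          have hqsplit : rs.takeWhile q ++ rs.dropWhile q = rs := List.takeWhile_append_dropWhile
          have hqlen : (rs.takeWhile q).length + (rs.dropWhile q).length = rs.length := by
            rw [← List.length_append, hqsplit]
          have hA2 : rs.foldl stepA
                ((acc1 ++ format_table (l :: ls.takeWhile p) ++ [""]) ++ [r], false, []) =
              (rs.dropWhile q).foldl stepA
                ((acc1 ++ format_table (l :: ls.takeWhile p) ++ [""]) ++ [r] ++ rs.takeWhile q,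
                 false, []) := by
            conv_lhs => rw [← hqsplit]
            rw [foldl_false_run _ (fun x hx => by
              have := List.mem_takeWhile_imp hx
              rw [hq] at this
              simp only [beq_iff_eq] at this
              rw [this, hr])]
          have hlen3 : rs.length < n := by
            have h5 : (ls.dropWhile p).length = rs.length + 1 := by rw [hrest]; simp
            omega
          simp only [List.cons_ne_nil, ne_eq, not_false_eq_true, ite_true, goB]
          rw [hA2]
          rw [IH (rs.dropWhile q).length (by omega) (rs.dropWhile q) rfl]
          simp
          simp [hr]

theorem improve_table_formatting_spec : Claim_equal_improve_table_formatting := by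
  intro content _
  unfold Spec_improve_table_formatting improve_table_formatting improve_table_formatting_alt
  by_cases h : content = ""
  · simp [h]
  · simp only [if_neg h]
    have := mainA (pySplit content "\n").length (pySplit content "\n") rfl []
    simp only [finishA] at this
    rw [this]
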